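-- pv_equiv track=rewrite | github.com/amirrosen1/Boggle | ex12_utils.py | _help_find_all_sequences
-- ===== SOURCE A (Python) =====
-- def _help_find_all_sequences(board_in_1D, current_seq, word_len,
--                              all_seq_lst):
--
--     """
--         The function returns a list that contains all the possible
--          combinations for the letters that appear on the game board.
--         :param board_in_1D: A game board represented in one list.
--         :param current_seq: Current sequence for certain letters from the
--          board.
--         :param word_len: The length of the word
--         :param all_seq_lst: A list that contains all the phrases that can
--          be created from the game board.
--     """
--
--     if word_len == 0:
--         all_seq_lst.append(current_seq)
--         return all_seq_lst
--     for letter in board_in_1D: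
--         _help_find_all_sequences(board_in_1D, current_seq + letter,
--                                  word_len - 1, all_seq_lst)
--     return all_seq_lst
-- ===== SOURCE B (Python) =====
-- def _help_find_all_sequences(board_in_1D, current_seq, word_len,
--                              all_seq_lst):
--     # Iterative frontier expansion instead of recursion; mutates and
--     # returns all_seq_lst like the original. There are no sequences of
--     # negative length, so a negative word_len adds nothing.
--     if word_len < 0:
--         return all_seq_lst
--     results = [current_seq]
--     for _ in range(word_len):
--         results = [seq + letter for seq in results for letter in board_in_1D]
--     all_seq_lst.extend(results)
--     return all_seq_lst
-- ===== Notes on version B (the rewrite author's own statement) =====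
-- stated objective: alternative
-- what changed: Replaces the depth-first recursion (one recursive call per partial sequence) with an iterative breadth-first frontier: a list of partial sequences is expanded word_len times by a product comprehension, then appended to all_seq_lst in one extend. (B also returns all_seq_lst unchanged where A would recurse forever on a negative word_len with a nonempty board; those inputs are outside Pre_).
import Mathlib
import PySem

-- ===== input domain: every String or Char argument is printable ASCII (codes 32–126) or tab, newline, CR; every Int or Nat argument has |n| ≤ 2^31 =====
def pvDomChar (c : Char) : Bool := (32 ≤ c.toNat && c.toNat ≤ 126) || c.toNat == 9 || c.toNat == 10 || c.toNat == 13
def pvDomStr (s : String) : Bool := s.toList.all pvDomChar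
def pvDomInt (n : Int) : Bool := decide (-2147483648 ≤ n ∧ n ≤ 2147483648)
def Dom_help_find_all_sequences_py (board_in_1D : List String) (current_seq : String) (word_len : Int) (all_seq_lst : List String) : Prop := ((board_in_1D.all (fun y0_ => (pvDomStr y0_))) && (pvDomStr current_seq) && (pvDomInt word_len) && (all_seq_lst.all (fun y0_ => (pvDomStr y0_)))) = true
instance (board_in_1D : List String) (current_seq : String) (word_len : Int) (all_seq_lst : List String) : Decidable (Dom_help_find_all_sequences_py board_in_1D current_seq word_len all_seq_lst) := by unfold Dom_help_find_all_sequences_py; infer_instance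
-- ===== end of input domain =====

-- B replaces A's depth-first recursion by an iterative frontier expansion; equivalence is about
-- the RETURN value only (both Pythons also mutate all_seq_lst in place, appending the same items
-- on the claimed inputs).

-- ===== PORT A =====
-- pvAgo is A's recursion made structural on a fuel = word_len.toNat (a pure totality device:
-- on the inputs admitted by Pre_ fuel 0 is reached exactly when word_len = 0 — A's base case —
-- or when word_len < 0 with an empty board, where A's for-loop body never runs and A returns
-- all_seq_lst, exactly what the fuel-0 branch returns).
def pvAgo (board_in_1D : List String) (fuel : Nat) (current_seq : String) (word_len : Int) (all_seq_lst : List String) : List String :=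
  match fuel with
  | 0 => if word_len == 0 then all_seq_lst ++ [current_seq] else all_seq_lst
  | f + 1 =>
    if word_len == 0 then all_seq_lst ++ [current_seq]
    else
      board_in_1D.foldl
        (fun acc letter => pvAgo board_in_1D f (current_seq ++ letter) (word_len - 1) acc)
        all_seq_lst

def help_find_all_sequences_py (board_in_1D : List String) (current_seq : String) (word_len : Int) (all_seq_lst : List String) : List String :=
  pvAgo board_in_1D word_len.toNat current_seq word_len all_seq_lst

-- ===== PORT B =====
def help_find_all_sequences_py_alt (board_in_1D : List String) (current_seq : String) (word_len : Int) (all_seq_lst : List String) : List String :=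
  if word_len < 0 then all_seq_lst
  else
    let results :=
      (PySem.List.pyRange 0 word_len 1).foldl
        (fun rs _ => rs.flatMap (fun seq => board_in_1D.map (fun letter => seq ++ letter)))
        [current_seq]
    all_seq_lst ++ results

-- ===== PRECONDITION & SPEC =====
-- Pre_ excludes exactly the inputs where A raises: word_len < 0 with a nonempty board
-- makes A recurse forever (RecursionError).
def Pre_help_find_all_sequences_py (board_in_1D : List String) (current_seq : String) (word_len : Int) (all_seq_lst : List String) : Prop :=
  0 ≤ word_len ∨ board_in_1D = []
instance (board_in_1D : List String) (current_seq : String) (word_len : Int) (all_seq_lst : List String) : Decidable (Pre_help_find_all_sequences_py board_in_1D current_seq word_len all_seq_lst) := by unfold Pre_help_find_all_sequences_py; infer_instance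

def pvWitness_help_find_all_sequences_py : List String × String × Int × List String := (["a", "b"], "x", 2, ["p"])

def Spec_help_find_all_sequences_py (board_in_1D : List String) (current_seq : String) (word_len : Int) (all_seq_lst : List String) (out : List String) : Prop := out = help_find_all_sequences_py_alt board_in_1D current_seq word_len all_seq_lst
instance (board_in_1D : List String) (current_seq : String) (word_len : Int) (all_seq_lst : List String) (out : List String) : Decidable (Spec_help_find_all_sequences_py board_in_1D current_seq word_len all_seq_lst out) := by unfold Spec_help_find_all_sequences_py; infer_instance

-- ===== CLAIM =====
def Claim_equal_help_find_all_sequences_py : Prop := ∀ (board_in_1D : List String) (current_seq : String) (word_len : Int) (all_seq_lst : List String), Dom_help_find_all_sequences_py board_in_1D current_seq word_len all_seq_lst → Pre_help_find_all_sequences_py board_in_1D current_seq word_len all_seq_lst → Spec_help_find_all_sequences_py board_in_1D current_seq word_len all_seq_lst (help_find_all_sequences_py board_in_1D current_seq word_len all_seq_lst)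
-- ===== LEMMAS AND PROOFS =====

-- one frontier-expansion step of B
def pvStep (board : List String) (rs : List String) : List String :=
  rs.flatMap (fun seq => board.map (fun letter => seq ++ letter))

lemma pvStep_append (board : List String) (l1 l2 : List String) :
    pvStep board (l1 ++ l2) = pvStep board l1 ++ pvStep board l2 := by
  simp [pvStep]

lemma pvStep_iter_append (board : List String) (k : Nat) (l1 l2 : List String) :
    (pvStep board)^[k] (l1 ++ l2) = (pvStep board)^[k] l1 ++ (pvStep board)^[k] l2 := by
  induction k generalizing l1 l2 with
  | zero => rfl
  | succ k ih =>
      rw [Function.iterate_succ_apply, Function.iterate_succ_apply,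
        Function.iterate_succ_apply, pvStep_append, ih]

lemma pvStep_iter_nil (board : List String) (k : Nat) :
    (pvStep board)^[k] ([] : List String) = [] := by
  induction k with
  | zero => rfl
  | succ k ih => rw [Function.iterate_succ_apply, show pvStep board [] = [] from rfl, ih]

lemma pvStep_iter_eq_flatMap (board : List String) (k : Nat) (xs : List String) :
    (pvStep board)^[k] xs = xs.flatMap (fun s => (pvStep board)^[k] [s]) := by
  induction xs with
  | nil => simp [pvStep_iter_nil]
  | cons x xs ih =>
      rw [show x :: xs = [x] ++ xs from rfl, pvStep_iter_append, ih, List.flatMap_append]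
      simp

lemma pvAgo_eq_iter (board : List String) (k : Nat) (cur : String) (acc : List String) :
    pvAgo board k cur (k : Int) acc = acc ++ (pvStep board)^[k] [cur] := by
  induction k generalizing cur acc with
  | zero => simp [pvAgo]
  | succ k ih =>
      rw [pvAgo]
      have h0 : (((k : Int) + 1) == 0) = false := by simp; omega
      simp only [Nat.cast_succ, h0, Bool.false_eq_true, if_false]
      simp only [show (k : Int) + 1 - 1 = (k : Int) from by omega, ih]
      rw [PySem.List.foldl_append_eq_flatMap]
      congr 1
      rw [Function.iterate_succ_apply, show pvStep board [cur] = board.map (fun l => cur ++ l) from by simp [pvStep],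
        pvStep_iter_eq_flatMap, List.flatMap_map]

lemma pvB_eq_iter (board : List String) (cur : String) (n : Int) (acc : List String)
    (hn : 0 ≤ n) :
    help_find_all_sequences_py_alt board cur n acc
      = acc ++ (pvStep board)^[n.toNat] [cur] := by
  unfold help_find_all_sequences_py_alt
  rw [if_neg (by omega)]
  congr 1
  rw [PySem.List.pyRange_one]
  have : ∀ (l : List Int) (init : List String),
      l.foldl (fun rs _ => rs.flatMap (fun seq => board.map (fun letter => seq ++ letter))) init
        = (pvStep board)^[l.length] init := by
    intro l
    induction l with
    | nil => intro init; rfl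
    | cons x xs ih =>
        intro init
        simp only [List.foldl_cons, List.length_cons, Function.iterate_succ_apply]
        exact ih _
  rw [this]
  simp

-- ===== VERDICT =====
theorem help_find_all_sequences_py_spec : Claim_equal_help_find_all_sequences_py := by
  intro board cur n acc _ hpre
  show help_find_all_sequences_py board cur n acc = _
  by_cases hn : 0 ≤ n
  · obtain ⟨k, rfl⟩ := Int.eq_ofNat_of_zero_le hn
    rw [pvB_eq_iter _ _ _ _ hn]
    unfold help_find_all_sequences_py
    rw [show ((k : Int)).toNat = k from by omega, pvAgo_eq_iter]
  · have hb : board = [] := by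
      rcases hpre with h | h
      · omega
      · exact h
    subst hb
    unfold help_find_all_sequences_py pvAgo help_find_all_sequences_py_alt
    rw [show n.toNat = 0 from by omega, if_neg (by simp; omega), if_pos (by omega)]
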